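-- pv_equiv track=rewrite | github.com/hallynnyh/Projetos-Let-s-Code | Módulo 02 - Projeto/Hallynny Henrique Barros_projeto2.py | agrupar_musicos
-- ===== SOURCE A (Python) =====
-- def agrupar_musicos(musicos, bandas):
--     aux = []
--     if len(bandas) > 0:
--         for a in bandas:
--             for b in musicos[0]:
--                 if b not in a:
--                     novo_a = a[:]
--                     novo_a.append(b)
--                     aux.append(novo_a)
--         bandas = aux[:]
--     else:
--         for musico in musicos[0]:
--             bandas.append([musico])
--     musicos.pop(0)
--
--
--     return agrupar_musicos(musicos, bandas) if (len(musicos) > 0) else bandas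
-- ===== SOURCE B (Python) =====
-- def agrupar_musicos(musicos, bandas):
--     while musicos:
--         grupo = musicos.pop(0)
--         if bandas:
--             bandas = [a + [b] for a in bandas for b in grupo if b not in a]
--         else:
--             bandas = [[m] for m in grupo]
--     return bandas
-- ===== Notes on version B (the rewrite author's own statement) =====
-- stated objective: simpler
-- what changed: Replaces A's tail recursion with explicit append-loops by a while loop that pops each group and rebinds bandas with a single list comprehension; B never mutates bandas in place.
import Mathlib
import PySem

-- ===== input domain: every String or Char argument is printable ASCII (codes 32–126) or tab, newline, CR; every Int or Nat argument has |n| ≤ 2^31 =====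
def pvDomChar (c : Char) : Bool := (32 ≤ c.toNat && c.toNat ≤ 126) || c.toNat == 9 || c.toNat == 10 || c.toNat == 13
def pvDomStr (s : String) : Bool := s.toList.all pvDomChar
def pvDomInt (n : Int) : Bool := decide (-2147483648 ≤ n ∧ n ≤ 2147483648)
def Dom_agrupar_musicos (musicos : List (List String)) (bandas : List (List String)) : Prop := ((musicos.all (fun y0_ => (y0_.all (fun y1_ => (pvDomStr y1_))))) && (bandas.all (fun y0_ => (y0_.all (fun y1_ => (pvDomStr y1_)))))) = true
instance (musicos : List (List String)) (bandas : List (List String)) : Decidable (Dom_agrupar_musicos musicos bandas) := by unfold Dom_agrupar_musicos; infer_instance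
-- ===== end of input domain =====

-- B replaces A's tail recursion with a while loop and list comprehensions (same cost);
-- equivalence is about the RETURN value: both empty `musicos` in place, but B rebinds
-- `bandas` instead of appending into it when `bandas` is initially empty.


-- ===== PORT A =====
-- Literal transliteration of A's tail recursion; on musicos = [] Python raises
-- IndexError at musicos[0] (excluded by Pre_), the port returns [] there.
def agrupar_musicos (musicos : List (List String)) (bandas : List (List String)) : List (List String) :=
  match musicos with
  | [] => []
  | m :: rest =>
    let bandas' :=
      if bandas.length > 0 then
        (bandas.foldl (fun aux a =>
          m.foldl (fun aux b =>
            if !(a.contains b) then aux ++ [a ++ [b]] else aux) aux) [])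
      else
        m.foldl (fun bs musico => bs ++ [[musico]]) bandas
    if rest.length > 0 then agrupar_musicos rest bandas' else bandas'

-- ===== PORT B =====
-- Transcription of Source B: while loop over musicos = foldl; comprehensions = flatMap/filter/map.
def agrupar_musicos_alt (musicos : List (List String)) (bandas : List (List String)) : List (List String) :=
  musicos.foldl (fun bandas grupo =>
    if bandas.length > 0 then
      bandas.flatMap (fun a => ((grupo.filter (fun b => !(a.contains b))).map (fun b => a ++ [b])))
    else
      grupo.map (fun m => [m])) bandas

-- ===== PRECONDITION & SPEC =====
-- Pre_ excludes only musicos = [], where Python A raises IndexError at musicos[0].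
def Pre_agrupar_musicos (musicos : List (List String)) (bandas : List (List String)) : Prop := musicos ≠ []
instance (musicos : List (List String)) (bandas : List (List String)) : Decidable (Pre_agrupar_musicos musicos bandas) := by unfold Pre_agrupar_musicos; infer_instance
def pvWitness_agrupar_musicos : List (List String) × List (List String) := ([["a", "b"], ["c"]], [])

def Spec_agrupar_musicos (musicos : List (List String)) (bandas : List (List String)) (out : List (List String)) : Prop := out = agrupar_musicos_alt musicos bandas
instance (musicos : List (List String)) (bandas : List (List String)) (out : List (List String)) : Decidable (Spec_agrupar_musicos musicos bandas out) := by unfold Spec_agrupar_musicos; infer_instance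

-- ===== CLAIM (what is proved, stated in full; the proofs are below) =====
def Claim_equal_agrupar_musicos : Prop := ∀ (musicos : List (List String)) (bandas : List (List String)), Dom_agrupar_musicos musicos bandas → Pre_agrupar_musicos musicos bandas → Spec_agrupar_musicos musicos bandas (agrupar_musicos musicos bandas)

-- ===== LEMMAS AND PROOFS =====

def pvStepA (m : List String) (bandas : List (List String)) : List (List String) :=
  if bandas.length > 0 then
    (bandas.foldl (fun aux a =>
      m.foldl (fun aux b =>
        if !(a.contains b) then aux ++ [a ++ [b]] else aux) aux) [])
  else
    m.foldl (fun bs musico => bs ++ [[musico]]) bandas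

def pvStepB (grupo : List String) (bandas : List (List String)) : List (List String) :=
  if bandas.length > 0 then
    bandas.flatMap (fun a => ((grupo.filter (fun b => !(a.contains b))).map (fun b => a ++ [b])))
  else
    grupo.map (fun m => [m])

-- One step of A (the body before the pop) equals one step of B's fold.
theorem pvStep_eq (m : List String) (bandas : List (List String)) : pvStepA m bandas = pvStepB m bandas := by
  unfold pvStepA pvStepB
  rcases bandas with _ | ⟨h, t⟩
  · simp only [PySem.List.foldl_append_singleton_eq_map]
    simp
  · simp only [PySem.List.foldl_append_if, PySem.List.foldl_append_eq_flatMap]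
    simp

theorem pvA_cons (m : List String) (rest bandas : List (List String)) :
    agrupar_musicos (m :: rest) bandas =
      if rest.length > 0 then agrupar_musicos rest (pvStepA m bandas) else pvStepA m bandas := rfl

theorem pvB_cons (m : List String) (rest bandas : List (List String)) :
    agrupar_musicos_alt (m :: rest) bandas = agrupar_musicos_alt rest (pvStepB m bandas) := rfl

theorem pvMain (musicos : List (List String)) :
    ∀ bandas, musicos ≠ [] →
      agrupar_musicos musicos bandas = agrupar_musicos_alt musicos bandas := by
  induction musicos with
  | nil => intro _ h; exact absurd rfl h
  | cons m rest ih =>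
    intro bandas _
    rw [pvA_cons, pvB_cons, pvStep_eq]
    rcases rest with _ | ⟨r, rs⟩
    · simp [agrupar_musicos_alt]
    · rw [if_pos (by simp : (r :: rs).length > 0)]
      exact ih _ (by simp)

-- ===== VERDICT (by name: the statement is the Claim_ definition above) =====
theorem agrupar_musicos_spec : Claim_equal_agrupar_musicos := by
  intro musicos bandas _ hpre
  exact pvMain musicos bandas hpre
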